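-- pv_equiv track=rewrite | github.com/Chouhan705/HackUp-Fantastic_Four | test3/urls/url_analyzer/checks/tls.py | _match_hostname
-- ===== SOURCE A (Python) =====
-- def _match_hostname(hostname: str, san_list: list[str], cn: str) -> bool:
--     host_lower = hostname.lower()
--     names = [cn.lower()] + [s.lower() for s in san_list]
--     for name in names:
--         if name == host_lower:
--             return True
--         if name.startswith("*."):
--             suffix = name[2:]
--             if host_lower == suffix or host_lower.endswith("." + suffix):
--                 if host_lower.count(".") == suffix.count(".") + 1:
--                     return True
--     return False
-- ===== SOURCE B (Python) =====
-- def _match_hostname(hostname: str, san_list: list[str], cn: str) -> bool: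
--     host = hostname.lower()
--     dot = host.find(".")
--     wild_tail = host[dot:] if dot != -1 else None
--     for name in [cn] + list(san_list):
--         n = name.lower()
--         if n == host:
--             return True
--         if wild_tail is not None and n.startswith("*") and n[1:] == wild_tail:
--             return True
--     return False
-- ===== Notes on version B (the rewrite author's own statement) =====
-- stated objective: simpler
-- what changed: B precomputes the host's first-dot suffix once and decides each wildcard name by a single comparison of name[1:] against that suffix, replacing A's per-name endswith test plus dot-count arithmetic.
import Mathlib
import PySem

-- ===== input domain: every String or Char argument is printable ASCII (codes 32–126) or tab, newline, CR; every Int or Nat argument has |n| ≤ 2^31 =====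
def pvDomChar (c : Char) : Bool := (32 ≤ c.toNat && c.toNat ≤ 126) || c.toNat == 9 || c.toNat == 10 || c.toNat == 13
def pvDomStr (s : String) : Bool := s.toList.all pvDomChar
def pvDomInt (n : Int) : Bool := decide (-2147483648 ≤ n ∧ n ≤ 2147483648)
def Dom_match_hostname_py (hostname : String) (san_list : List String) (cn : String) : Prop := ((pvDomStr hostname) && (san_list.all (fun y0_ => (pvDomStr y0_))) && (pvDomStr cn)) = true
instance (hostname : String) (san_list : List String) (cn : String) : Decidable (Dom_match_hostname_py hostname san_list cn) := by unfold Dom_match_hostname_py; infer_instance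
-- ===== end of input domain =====

-- B replaces A's endswith + dot-count arithmetic for wildcard names by precomputing the
-- host's first-dot suffix once and comparing name[1:] against it (simpler, one test per name).

-- ===== PORT A =====
-- the for-loop with early return, over lowered names (List Char side)
def matchA_loop (host : List Char) : List (List Char) → Bool
  | [] => false
  | name :: rest =>
    if name == host then true
    else if PySem.Chars.startswith name ['*', '.'] then
      let suffix := PySem.List.slice name (some 2) none
      if host == suffix || PySem.Chars.endswith host ('.' :: suffix) then
        if PySem.Chars.count host ['.'] == PySem.Chars.count suffix ['.'] + 1 then true
        else matchA_loop host rest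
      else matchA_loop host rest
    else matchA_loop host rest

def match_hostname_py (hostname : String) (san_list : List String) (cn : String) : Bool :=
  let host_lower := PySem.Chars.lower hostname.toList
  let names := [PySem.Chars.lower cn.toList] ++ san_list.map (fun s => PySem.Chars.lower s.toList)
  matchA_loop host_lower names

-- ===== PORT B =====
-- B's loop: wild_tail (host[dot:] if host has a dot) is computed once, outside the loop
def matchB_loop (host : List Char) (wildTail : Option (List Char)) : List (List Char) → Bool
  | [] => false
  | name :: rest =>
    let n := PySem.Chars.lower name
    if n == host then true
    else if (match wildTail with
             | some t => PySem.Chars.startswith n ['*'] && PySem.List.slice n (some 1) none == t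
             | none => false) then true
    else matchB_loop host wildTail rest

def match_hostname_py_alt (hostname : String) (san_list : List String) (cn : String) : Bool :=
  let host := PySem.Chars.lower hostname.toList
  let dot := PySem.Chars.find host ['.']
  let wildTail := if dot == -1 then none else some (PySem.List.slice host (some dot) none)
  matchB_loop host wildTail ([cn.toList] ++ san_list.map String.toList)

-- ===== PRECONDITION & SPEC =====
def Spec_match_hostname_py (hostname : String) (san_list : List String) (cn : String) (out : Bool) : Prop := out = match_hostname_py_alt hostname san_list cn
instance (hostname : String) (san_list : List String) (cn : String) (out : Bool) : Decidable (Spec_match_hostname_py hostname san_list cn out) := by unfold Spec_match_hostname_py; infer_instance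

-- ===== CLAIM (what is proved, stated in full; the proofs are below) =====
def Claim_equal_match_hostname_py : Prop := ∀ (hostname : String) (san_list : List String) (cn : String), Dom_match_hostname_py hostname san_list cn → Spec_match_hostname_py hostname san_list cn (match_hostname_py hostname san_list cn)

-- ===== LEMMAS AND PROOFS =====

-- Chars.count with a single-character needle is List.count
lemma countgo_single (c : Char) : ∀ (fuel : Nat) (s : List Char) (acc : Nat), s.length ≤ fuel →
    PySem.Chars.count.go [c] fuel s acc = acc + s.count c := by
  intro fuel
  induction fuel with
  | zero => intro s acc h; cases s with
    | nil => simp [PySem.Chars.count.go]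
    | cons a t => simp at h
  | succ m ih => intro s acc h; cases s with
    | nil => simp [PySem.Chars.count.go]
    | cons a t =>
      simp only [PySem.Chars.count.go]
      by_cases hac : a = c
      · subst hac
        simp only [List.isPrefixOf]
        simp only [List.length_singleton, List.drop_one, List.tail_cons]
        rw [ih t (acc + 1) (by simpa using Nat.le_of_succ_le_succ h)]
        simp
        omega
      · have : ([c].isPrefixOf (a :: t)) = false := by
          simp [List.isPrefixOf]; exact fun h' => absurd h'.symm hac
        rw [this]
        simp only [Bool.false_eq_true, if_false]
        rw [ih t acc (by simpa using Nat.le_of_succ_le_succ h)]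
        simp [hac]

lemma count_single (s : List Char) (c : Char) : PySem.Chars.count s [c] = s.count c := by
  have h := countgo_single c s.length s 0 le_rfl
  simp [PySem.Chars.count, h]

-- first-dot characterisation: find on a list p ++ c :: s with c ∉ p
lemma find_single_eq (c : Char) (p s : List Char) (hp : c ∉ p) :
    PySem.Chars.find (p ++ c :: s) [c] = (p.length : Int) := by
  set host := p ++ c :: s with hh
  have hinf : [c] <:+: host := ⟨p, s, by simp [hh]⟩
  have hpos : 0 ≤ PySem.Chars.find host [c] := (PySem.Chars.find_nonneg_iff host [c]).mpr hinf
  obtain ⟨hpre, hmin⟩ := PySem.Chars.find_spec hpos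
  set d := (PySem.Chars.find host [c]).toNat with hd
  have hdlen : d ≤ host.length := by
    have := PySem.Chars.find_le_length host [c]; omega
  -- d cannot exceed p.length: [c] is a prefix of host.drop p.length
  have hle : d ≤ p.length := by
    by_contra hgt
    rw [not_le] at hgt
    have hdrop : host.drop p.length = c :: s := by simp [hh]
    exact hmin p.length hgt ⟨s, by simp [hdrop]⟩
  -- d cannot be below p.length: host[d] would be an element of p equal to c
  have hge : p.length ≤ d := by
    by_contra hlt
    rw [not_le] at hlt
    obtain ⟨t, ht⟩ : ∃ t, host.drop d = c :: t := by
      rcases hpre with ⟨t, ht⟩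
      exact ⟨t, by simpa using ht.symm⟩
    have hdl : d < host.length := by simp [hh]; omega
    have hc : host[d]'hdl = c := by
      have hlen : 0 < (host.drop d).length := by simp [ht]
      have := List.getElem_drop (xs := host) (i := d) (j := 0) (h := hlen)
      simp [ht] at this
      simpa using this.symm
    have heq : host[d]'hdl = p[d]'hlt := by
      simp [hh, List.getElem_append_left hlt]
    have : c ∈ p := by rw [← hc, heq]; exact List.getElem_mem _
    exact hp this
  have : d = p.length := le_antisymm hle hge
  omega

-- A's per-name wildcard test equals B's, packaged as equality of loop bodies
lemma slice_from_two (l : List Char) : PySem.List.slice l (some 2) none = l.drop 2 := by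
  have := PySem.List.slice_from_natCast l 2
  simpa using this

-- B's wildcard test at a name, as A will see it
lemma cond_eq (host n : List Char) :
    (PySem.Chars.startswith n ['*', '.'] &&
      ((host == PySem.List.slice n (some 2) none ||
        PySem.Chars.endswith host ('.' :: PySem.List.slice n (some 2) none)) &&
       (PySem.Chars.count host ['.'] == PySem.Chars.count (PySem.List.slice n (some 2) none) ['.'] + 1)))
    = (match (if PySem.Chars.find host ['.'] == -1 then none
              else some (PySem.List.slice host (some (PySem.Chars.find host ['.'])) none) : Option (List Char)) with
       | some t => PySem.Chars.startswith n ['*'] && PySem.List.slice n (some 1) none == t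
       | none => false) := by
  rw [slice_from_two]
  apply Bool.eq_iff_iff.mpr
  constructor
  · -- A's test implies B's
    intro hA
    simp only [Bool.and_eq_true, Bool.or_eq_true, beq_iff_eq] at hA
    obtain ⟨hstar, hor, hcnt⟩ := hA
    rw [count_single, count_single] at hcnt
    obtain ⟨s, hn⟩ : ∃ s, n = '*' :: '.' :: s := by
      rcases (PySem.Chars.startswith_iff n ['*', '.']).mp hstar with ⟨t, ht⟩
      exact ⟨t, ht.symm⟩
    have hsuf : n.drop 2 = s := by simp [hn]
    rw [hsuf] at hor hcnt
    rcases hor with heq | hend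
    · subst heq; omega
    · rcases (PySem.Chars.endswith_iff host ('.' :: s)).mp hend with ⟨p, hhost⟩
      have hp : '.' ∉ p := by
        subst hhost
        simp [List.count_append] at hcnt
        have : p.count '.' = 0 := by omega
        simpa [List.count_eq_zero] using this
      have hfind : PySem.Chars.find host ['.'] = (p.length : Int) := by
        rw [← hhost]
        exact find_single_eq '.' p s hp
      have hne : (PySem.Chars.find host ['.'] == -1) = false := by
        simp [hfind]
      rw [hne]
      simp only [Bool.false_eq_true, if_false]
      have hdrop : PySem.List.slice host (some (PySem.Chars.find host ['.'])) none = '.' :: s := by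
        rw [hfind, PySem.List.slice_from _ (by positivity)]
        simp [← hhost]
      rw [hdrop]
      simp [hn, PySem.Chars.startswith, PySem.List.slice_from_one]
  · -- B's test implies A's
    intro hB
    by_cases hne : PySem.Chars.find host ['.'] = -1
    · simp [hne] at hB
    · have hpos : 0 ≤ PySem.Chars.find host ['.'] := by
        have := PySem.Chars.neg_one_le_find host ['.']
        omega
      simp only [beq_iff_eq, hne, if_false] at hB
      obtain ⟨hstar, htl⟩ := by simpa using hB
      obtain ⟨hpre, hmin⟩ := PySem.Chars.find_spec hpos
      set d := (PySem.Chars.find host ['.']).toNat with hd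
      obtain ⟨s, hds⟩ : ∃ s, host.drop d = '.' :: s := by
        rcases hpre with ⟨t, ht⟩
        exact ⟨t, by simpa using ht.symm⟩
      have hdlen : d ≤ host.length := by
        have := PySem.Chars.find_le_length host ['.']
        omega
      have hhost : host = host.take d ++ '.' :: s := by
        rw [← hds, List.take_append_drop]
      have hp : '.' ∉ host.take d := by
        intro hmem
        rcases List.mem_iff_getElem.mp hmem with ⟨i, hi, hgi⟩
        have hilen : i < host.length := by simp at hi; omega
        apply hmin i (by simp at hi; omega)
        have : host.drop i = '.' :: host.drop (i+1) := by
          rw [List.drop_eq_getElem_cons hilen]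
          congr 1
          rw [← hgi, List.getElem_take]
        exact ⟨host.drop (i+1), by simp [this]⟩
      have hslice : PySem.List.slice host (some (PySem.Chars.find host ['.'])) none = '.' :: s := by
        rw [PySem.List.slice_from _ hpos, ← hd, hds]
      rw [hslice] at htl
      have h1 : PySem.List.slice n (some 1) none = n.tail := PySem.List.slice_from_one n
      rw [h1] at htl
      have htail : n.tail = '.' :: s := by simpa using htl
      obtain ⟨t, hn⟩ : ∃ t, n = '*' :: t := by
        rcases (PySem.Chars.startswith_iff n ['*']).mp hstar with ⟨t, ht⟩
        exact ⟨t, ht.symm⟩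
      have hn' : n = '*' :: '.' :: s := by rw [hn]; rw [hn] at htail; simpa using htail ▸ rfl
      have hsuf : n.drop 2 = s := by simp [hn']
      simp only [Bool.and_eq_true, Bool.or_eq_true, beq_iff_eq, hsuf]
      refine ⟨?_, Or.inr ?_, ?_⟩
      · rw [hn']; simp [PySem.Chars.startswith]
      · exact (PySem.Chars.endswith_iff host ('.' :: s)).mpr ⟨host.take d, hhost.symm⟩
      · rw [count_single, count_single, hhost]
        simp [List.count_append, List.count_eq_zero.mpr hp]

-- unfold one step of each loop into "body ∨ rest"
lemma matchA_loop_cons (host n : List Char) (rest : List (List Char)) :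
    matchA_loop host (n :: rest)
      = ((n == host) ||
         (PySem.Chars.startswith n ['*', '.'] &&
          ((host == PySem.List.slice n (some 2) none ||
            PySem.Chars.endswith host ('.' :: PySem.List.slice n (some 2) none)) &&
           (PySem.Chars.count host ['.'] == PySem.Chars.count (PySem.List.slice n (some 2) none) ['.'] + 1))) ||
         matchA_loop host rest) := by
  simp only [matchA_loop]
  split_ifs <;> simp_all

lemma matchB_loop_cons (host : List Char) (wt : Option (List Char)) (n : List Char) (rest : List (List Char)) :
    matchB_loop host wt (n :: rest)
      = ((PySem.Chars.lower n == host) ||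
         (match wt with
          | some t => PySem.Chars.startswith (PySem.Chars.lower n) ['*'] && PySem.List.slice (PySem.Chars.lower n) (some 1) none == t
          | none => false) ||
         matchB_loop host wt rest) := by
  simp only [matchB_loop]
  split_ifs <;> simp_all

lemma loops_eq (host : List Char) (l : List (List Char)) :
    matchA_loop host (l.map PySem.Chars.lower)
      = matchB_loop host
          (if PySem.Chars.find host ['.'] == -1 then none
           else some (PySem.List.slice host (some (PySem.Chars.find host ['.'])) none)) l := by
  induction l with
  | nil => simp [matchA_loop, matchB_loop]
  | cons n rest ih =>
    rw [List.map_cons, matchA_loop_cons, matchB_loop_cons, ih, cond_eq host (PySem.Chars.lower n)]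

-- ===== VERDICT (by name: the statement is the Claim_ definition above) =====
theorem match_hostname_py_spec : Claim_equal_match_hostname_py := by
  intro hostname san_list cn _
  unfold Spec_match_hostname_py match_hostname_py match_hostname_py_alt
  have := loops_eq (PySem.Chars.lower hostname.toList)
      (cn.toList :: san_list.map String.toList)
  simpa [List.map_map, Function.comp] using this
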